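-- pv_equiv track=rewrite | github.com/intel-analytics/BigDL | pyspark/bigdl/keras/converter.py | __perm_to_pair
-- ===== SOURCE A (Python) =====
-- def __perm_to_pair(perm):
--     # perm: a list as a permutation of [1..n], eg [3, 1, 2] for n=3.
--     # return a list of tuples that needs to be swapped to obtain the input `perm`.
--     pairs = []
--
--     def sort(arr, low, high):
--         i = low
--         j = high
--         pivot = arr[low + int((high - low) / 2)]
--         while i <= j:
--             while arr[i] < pivot:
--                 i += 1
--             while arr[j] > pivot:
--                 j -= 1
--             if i <= j:
--                 exchangeNumbers(arr, i, j)
--                 i += 1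
--                 j -= 1
--         if low < j:
--             sort(arr, low, j)
--         if i < high:
--             sort(arr, i, high)
--
--     def exchangeNumbers(arr, i, j):
--         temp = arr[i]
--         arr[i] = arr[j]
--         arr[j] = temp
--         pairs.append((i + 1, j + 1))
--
--     sort(perm, 0, len(perm) - 1)
--
--     return filter(lambda pair: pair[0] != pair[1], pairs)
-- ===== SOURCE B (Python) =====
-- # Same partition as the original, but driven by an explicit stack of (low, high)
-- # intervals instead of recursion (left interval pushed last so it is processed first).
-- # Mutates perm in place, like the original.
-- def __perm_to_pair(perm):
--     pairs = []
--     stack = [(0, len(perm) - 1)]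
--     while stack:
--         low, high = stack.pop()
--         i = low
--         j = high
--         pivot = perm[low + int((high - low) / 2)]
--         while i <= j:
--             while perm[i] < pivot:
--                 i += 1
--             while perm[j] > pivot:
--                 j -= 1
--             if i <= j:
--                 perm[i], perm[j] = perm[j], perm[i]
--                 pairs.append((i + 1, j + 1))
--                 i += 1
--                 j -= 1
--         if i < high:
--             stack.append((i, high))
--         if low < j:
--             stack.append((low, j))
--     return filter(lambda pair: pair[0] != pair[1], pairs)
-- ===== Notes on version B (the rewrite author's own statement) =====
-- stated objective: alternative
-- what changed: The recursive quicksort driver (nested `sort` calling itself on the two sub-ranges) is replaced by an iterative driver with an explicit stack of (low, high) intervals, pushing the right sub-range first so the left one is processed next; the partition loop and the recorded swap pairs are unchanged.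
import Mathlib
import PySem

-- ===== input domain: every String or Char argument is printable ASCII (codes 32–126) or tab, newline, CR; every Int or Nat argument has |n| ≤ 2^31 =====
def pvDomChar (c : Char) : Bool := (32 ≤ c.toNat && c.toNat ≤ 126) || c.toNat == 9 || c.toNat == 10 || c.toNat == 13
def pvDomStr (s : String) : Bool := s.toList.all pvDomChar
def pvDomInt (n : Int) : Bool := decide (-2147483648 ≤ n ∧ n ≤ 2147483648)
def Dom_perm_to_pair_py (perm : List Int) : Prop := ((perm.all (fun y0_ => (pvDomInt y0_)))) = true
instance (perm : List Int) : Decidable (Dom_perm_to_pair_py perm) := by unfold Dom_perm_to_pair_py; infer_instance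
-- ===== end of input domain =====

-- B drives A's exact partition loop with an explicit stack of (low, high) intervals instead of
-- recursion (same cost, different decomposition).  Both Pythons sort `perm` in place; the
-- equivalence proved here is about the RETURN value only (the in-place swaps are the same).

-- ===== PORT A =====
-- A-side helpers.  The partition code (the two inner index scans, the outer `while i <= j` loop
-- and `exchangeNumbers`) is textually identical in A and in B, so these helpers are shared by
-- both ports; only the drivers (`sortA` vs `stackLoop`) differ.  The unbounded `while` loops and
-- the recursion are made total with a fuel argument (a totality guard only): the fuel amounts,
-- computed the same way in both ports, exceed the number of steps any Python run performs, and
-- the equivalence theorem holds for EVERY fuel because both drivers consume one unit per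
-- `sort` call / stack pop, threaded left-to-right.

-- `while arr[i] < pivot: i += 1` (pyGet? none = IndexError in Python, unreachable under Pre_:
-- the scan stops there, fuel 0 likewise never fires on a Python-reachable state)
def scanUpGo (arr : List Int) (pivot : Int) : Nat → Int → Int
  | 0, i => i
  | fuel + 1, i =>
    match PySem.List.pyGet? arr i with
    | some v => if v < pivot then scanUpGo arr pivot fuel (i + 1) else i
    | none => i

def scanUp (arr : List Int) (pivot i : Int) : Int :=
  scanUpGo arr pivot (2 * arr.length + 2) i

-- `while arr[j] > pivot: j -= 1`
def scanDownGo (arr : List Int) (pivot : Int) : Nat → Int → Int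
  | 0, j => j
  | fuel + 1, j =>
    match PySem.List.pyGet? arr j with
    | some v => if pivot < v then scanDownGo arr pivot fuel (j - 1) else j
    | none => j

def scanDown (arr : List Int) (pivot j : Int) : Int :=
  scanDownGo arr pivot (2 * arr.length + 2) j

-- `exchangeNumbers`'s in-place swap (the appended pair is recorded by the caller)
def pySwap (arr : List Int) (i j : Int) : List Int :=
  match PySem.List.pyGet? arr i, PySem.List.pyGet? arr j with
  | some vi, some vj => PySem.List.pySetD (PySem.List.pySetD arr i vj) j vi
  | _, _ => arr    -- IndexError in Python; unreachable under Pre_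

-- the `while i <= j:` partition loop; returns (arr, pairs, i, j) after the loop exits
def ploopGo (pivot : Int) : Nat → List Int → List (Int × Int) → Int → Int →
    List Int × List (Int × Int) × Int × Int
  | 0, arr, pairs, i, j => (arr, pairs, i, j)
  | fuel + 1, arr, pairs, i, j =>
    if i ≤ j then
      let i' := scanUp arr pivot i
      let j' := scanDown arr pivot j
      if i' ≤ j' then
        ploopGo pivot fuel (pySwap arr i' j') (pairs ++ [(i' + 1, j' + 1)]) (i' + 1) (j' - 1)
      else (arr, pairs, i', j')
    else (arr, pairs, i, j)

def ploop (arr : List Int) (pairs : List (Int × Int)) (pivot i j : Int) :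
    List Int × List (Int × Int) × Int × Int :=
  ploopGo pivot (arr.length + 2) arr pairs i j

-- A's recursive `sort(arr, low, high)`.  `fuel` counts the remaining `sort` calls (one unit
-- consumed per call, the leftover returned so the left recursion's leftover feeds the right
-- recursion); `bound` is a structural-recursion bound only, with bound ≥ fuel at every use.
def sortA : Nat → Nat → List Int → List (Int × Int) → Int → Int →
    Nat × List Int × List (Int × Int)
  | _, 0, arr, pairs, _, _ => (0, arr, pairs)
  | 0, fuel, arr, pairs, _, _ => (fuel, arr, pairs)
  | bound + 1, fuel + 1, arr, pairs, low, high =>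
    match PySem.List.pyGet? arr (low + (high - low).tdiv 2) with
    | none => (fuel, arr, pairs)   -- `arr[...]` raises IndexError in Python; unreachable under Pre_
    | some pivot =>
      let r := ploop arr pairs pivot low high
      let s := if low < r.2.2.2 then sortA bound fuel r.1 r.2.1 low r.2.2.2
               else (fuel, r.1, r.2.1)
      if r.2.2.1 < high then sortA bound s.1 s.2.1 s.2.2 r.2.2.1 high else s

-- `sort(perm, 0, len(perm) - 1)` then `return filter(lambda pair: pair[0] != pair[1], pairs)`
-- (quicksort performs at most 2·len(perm) + 2 `sort` calls, so the fuel is never exhausted)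
def perm_to_pair_py (perm : List Int) : List (Int × Int) :=
  (sortA (2 * perm.length + 2) (2 * perm.length + 2) perm [] 0 ((perm.length : Int) - 1)).2.2.filter
    (fun p => p.1 != p.2)

-- ===== PORT B =====
-- B-side helper: the `while stack:` loop.  The head of the Lean list is the top of the Python
-- stack (`stack.pop()` takes the last append); B appends (i, high) first and (low, j) second,
-- so after a pop the new stack is (optional (low, j)) :: (optional (i, high)) :: rest.  The
-- partition code inside the loop is B's verbatim copy of A's, hence the shared helpers.
-- One fuel unit per pop (pops = A's `sort` calls, so the same fuel bound applies).
def stackLoop : Nat → List Int → List (Int × Int) → List (Int × Int) → List (Int × Int)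
  | 0, _, _, pairs => pairs
  | fuel + 1, arr, stack, pairs =>
    match stack with
    | [] => pairs
    | (low, high) :: rest =>
      match PySem.List.pyGet? arr (low + (high - low).tdiv 2) with
      | none => stackLoop fuel arr rest pairs   -- IndexError in Python; unreachable under Pre_
      | some pivot =>
        let r := ploop arr pairs pivot low high
        stackLoop fuel r.1
          ((if low < r.2.2.2 then [(low, r.2.2.2)] else []) ++
           (if r.2.2.1 < high then [(r.2.2.1, high)] else []) ++ rest) r.2.1

def perm_to_pair_py_alt (perm : List Int) : List (Int × Int) :=
  (stackLoop (2 * perm.length + 2) perm [((0 : Int), (perm.length : Int) - 1)] []).filter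
    (fun p => p.1 != p.2)

-- ===== PRECONDITION & SPEC =====
-- Pre_ excludes only the empty list, on which A (and B alike) raises IndexError reading the pivot.
def Pre_perm_to_pair_py (perm : List Int) : Prop := perm ≠ []
instance (perm : List Int) : Decidable (Pre_perm_to_pair_py perm) := by
  unfold Pre_perm_to_pair_py; infer_instance

def pvWitness_perm_to_pair_py : List Int := ([3, 1, 2] : List Int)

def Spec_perm_to_pair_py (perm : List Int) (out : List (Int × Int)) : Prop :=
  out = perm_to_pair_py_alt perm
instance (perm : List Int) (out : List (Int × Int)) : Decidable (Spec_perm_to_pair_py perm out) := by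
  unfold Spec_perm_to_pair_py; infer_instance

-- ===== CLAIM (what is proved, stated in full; the proofs are below) =====
def Claim_equal_perm_to_pair_py : Prop := ∀ (perm : List Int), Dom_perm_to_pair_py perm →
  Pre_perm_to_pair_py perm → Spec_perm_to_pair_py perm (perm_to_pair_py perm)

-- ===== LEMMAS AND PROOFS =====

-- a `sort` call never returns more fuel than it was given
lemma sortA_fuel_le (bound fuel : Nat) (arr : List Int) (pairs : List (Int × Int))
    (low high : Int) : (sortA bound fuel arr pairs low high).1 ≤ fuel := by
  induction bound generalizing fuel arr pairs low high with
  | zero => cases fuel <;> simp [sortA]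
  | succ b ih =>
    cases fuel with
    | zero => simp [sortA]
    | succ g =>
      rw [sortA]
      split
      · omega
      · next pivot _ =>
        set r := ploop arr pairs pivot low high with hr
        by_cases hL : low < r.2.2.2 <;> by_cases hR : r.2.2.1 < high <;>
          simp only [hL, hR, if_true, if_false]
        · have h1 := ih g r.1 r.2.1 low r.2.2.2
          have h2 := ih (sortA b g r.1 r.2.1 low r.2.2.2).1
            (sortA b g r.1 r.2.1 low r.2.2.2).2.1 (sortA b g r.1 r.2.1 low r.2.2.2).2.2
            r.2.2.1 high
          omega
        · exact le_trans (ih g r.1 r.2.1 low r.2.2.2) (by omega)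
        · exact le_trans (ih g r.1 r.2.1 r.2.2.1 high) (by omega)
        · omega

-- the machine on an empty stack returns the pairs, whatever the fuel
lemma stackLoop_nil (fuel : Nat) (arr : List Int) (pairs : List (Int × Int)) :
    stackLoop fuel arr [] pairs = pairs := by
  cases fuel <;> rfl

-- running the stack machine on (low, high) :: rest is: A's recursive sort of (low, high),
-- then the machine on rest with the leftover fuel and the updated array and pairs
lemma stackLoop_sim (bound fuel : Nat) (hbf : fuel ≤ bound) (arr : List Int)
    (pairs : List (Int × Int)) (low high : Int) (rest : List (Int × Int)) :
    stackLoop fuel arr ((low, high) :: rest) pairs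
      = stackLoop (sortA bound fuel arr pairs low high).1
          (sortA bound fuel arr pairs low high).2.1 rest
          (sortA bound fuel arr pairs low high).2.2 := by
  induction bound generalizing fuel arr pairs low high rest with
  | zero =>
    have : fuel = 0 := by omega
    subst this
    rfl
  | succ b ih =>
    cases fuel with
    | zero => rfl
    | succ g =>
      rw [stackLoop, sortA]
      split
      · rfl
      · next pivot hpv =>
        set r := ploop arr pairs pivot low high with hr
        by_cases hL : low < r.2.2.2 <;> by_cases hR : r.2.2.1 < high
        · simp only [if_pos hL, if_pos hR, List.cons_append, List.nil_append]
          rw [ih g (by omega) r.1 r.2.1 low r.2.2.2 ((r.2.2.1, high) :: rest)]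
          exact ih (sortA b g r.1 r.2.1 low r.2.2.2).1
            (le_trans (sortA_fuel_le b g r.1 r.2.1 low r.2.2.2) (by omega))
            (sortA b g r.1 r.2.1 low r.2.2.2).2.1 (sortA b g r.1 r.2.1 low r.2.2.2).2.2
            r.2.2.1 high rest
        · simp only [if_pos hL, if_neg hR, List.cons_append, List.nil_append]
          exact ih g (by omega) r.1 r.2.1 low r.2.2.2 rest
        · simp only [if_neg hL, if_pos hR, List.cons_append, List.nil_append]
          exact ih g (by omega) r.1 r.2.1 r.2.2.1 high rest
        · simp only [if_neg hL, if_neg hR, List.nil_append]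

-- ===== VERDICT (by name: the statement is the Claim_ definition above) =====
theorem perm_to_pair_py_spec : Claim_equal_perm_to_pair_py := by
  intro perm _ _
  unfold Spec_perm_to_pair_py perm_to_pair_py perm_to_pair_py_alt
  rw [stackLoop_sim _ _ (le_refl _), stackLoop_nil]
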